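-- pv_equiv track=rewrite | github.com/gaetanbahl/AdventOfCode2021 | 22/22b.py | are_intersecting
-- ===== SOURCE A (Python) =====
-- def point_in_cube(p, c):
--     if p[0] < c[3] and p[0] > c[0]:
--         if p[1] < c[4] and p[1] > c[1]:
--             if p[2] < c[5] and p[2] > c[2]:
--                 return True
--     return False
--
-- def are_intersecting(c1,c2):
--
--     cubes = [c1, c2]
--     for i,c in enumerate(cubes):
--         for x in [c1[0], c1[3]]:
--             for y in [c1[1], c1[4]]:
--                 for z in [c1[2], c1[5]]:
--                     if point_in_cube((x,y,z), c):
--                         return True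
--     return False
-- ===== SOURCE B (Python) =====
-- def are_intersecting(c1, c2):
--     def axis_ok(lo, hi, a, b):
--         return lo < a < hi or lo < b < hi
--     return (axis_ok(c2[0], c2[3], c1[0], c1[3])
--             and axis_ok(c2[1], c2[4], c1[1], c1[4])
--             and axis_ok(c2[2], c2[5], c1[2], c1[5]))
-- ===== Notes on version B (the rewrite author's own statement) =====
-- stated objective: simpler
-- what changed: Replaced the 2x2x2x2 corner enumeration with point_in_cube by a per-axis closed form: each axis's strict containment of one of c1's two endpoints, conjoined over the three axes (the even-enumerate pass of A tests c1's corners inside c1 itself and never fires).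
import Mathlib
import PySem

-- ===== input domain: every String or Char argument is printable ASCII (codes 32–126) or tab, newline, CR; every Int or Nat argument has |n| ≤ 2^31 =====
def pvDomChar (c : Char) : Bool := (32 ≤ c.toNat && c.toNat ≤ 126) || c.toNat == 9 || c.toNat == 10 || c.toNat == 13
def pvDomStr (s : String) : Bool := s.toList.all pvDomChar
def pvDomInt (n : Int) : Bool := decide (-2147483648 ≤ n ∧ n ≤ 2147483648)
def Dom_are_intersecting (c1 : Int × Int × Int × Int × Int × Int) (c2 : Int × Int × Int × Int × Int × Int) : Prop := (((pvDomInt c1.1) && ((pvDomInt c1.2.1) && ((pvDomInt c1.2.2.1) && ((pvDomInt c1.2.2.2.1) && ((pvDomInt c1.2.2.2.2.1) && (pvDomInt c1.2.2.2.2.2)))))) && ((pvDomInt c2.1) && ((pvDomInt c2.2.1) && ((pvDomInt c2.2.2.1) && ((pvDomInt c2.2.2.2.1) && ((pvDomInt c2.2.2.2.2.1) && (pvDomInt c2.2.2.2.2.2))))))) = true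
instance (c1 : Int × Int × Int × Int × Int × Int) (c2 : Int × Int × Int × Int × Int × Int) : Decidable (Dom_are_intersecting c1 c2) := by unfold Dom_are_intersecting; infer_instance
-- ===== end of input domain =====

-- B replaces A's enumeration of c1's corners against both cubes with a per-axis closed form (simpler; return value only).
-- ===== PORT A =====
def point_in_cube (p : Int × Int × Int) (c : Int × Int × Int × Int × Int × Int) : Bool :=
  if p.1 < c.2.2.2.1 && p.1 > c.1 then
    if p.2.1 < c.2.2.2.2.1 && p.2.1 > c.2.1 then
      if p.2.2 < c.2.2.2.2.2 && p.2.2 > c.2.2.1 then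
        true
      else false
    else false
  else false

def are_intersecting (c1 : Int × Int × Int × Int × Int × Int) (c2 : Int × Int × Int × Int × Int × Int) : Bool :=
  -- for i,c in enumerate([c1,c2]): nested loops over c1's corner coordinates, early return on point_in_cube
  (PySem.List.enumerate [c1, c2]).any (fun ic =>
    [c1.1, c1.2.2.2.1].any (fun x =>
      [c1.2.1, c1.2.2.2.2.1].any (fun y =>
        [c1.2.2.1, c1.2.2.2.2.2].any (fun z =>
          point_in_cube (x, y, z) ic.2))))

-- ===== PORT B =====
def axis_ok (lo hi a b : Int) : Bool := (lo < a && a < hi) || (lo < b && b < hi)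

def are_intersecting_alt (c1 : Int × Int × Int × Int × Int × Int) (c2 : Int × Int × Int × Int × Int × Int) : Bool :=
  axis_ok c2.1 c2.2.2.2.1 c1.1 c1.2.2.2.1 &&
  (axis_ok c2.2.1 c2.2.2.2.2.1 c1.2.1 c1.2.2.2.2.1 &&
   axis_ok c2.2.2.1 c2.2.2.2.2.2 c1.2.2.1 c1.2.2.2.2.2)

-- ===== PRECONDITION & SPEC =====
def Spec_are_intersecting (c1 : Int × Int × Int × Int × Int × Int) (c2 : Int × Int × Int × Int × Int × Int) (out : Bool) : Prop := out = are_intersecting_alt c1 c2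
instance (c1 : Int × Int × Int × Int × Int × Int) (c2 : Int × Int × Int × Int × Int × Int) (out : Bool) : Decidable (Spec_are_intersecting c1 c2 out) := by unfold Spec_are_intersecting; infer_instance

-- ===== CLAIM (what is proved, stated in full; the proofs are below) =====
def Claim_equal_are_intersecting : Prop := ∀ (c1 : Int × Int × Int × Int × Int × Int) (c2 : Int × Int × Int × Int × Int × Int), Dom_are_intersecting c1 c2 → Spec_are_intersecting c1 c2 (are_intersecting c1 c2)

-- ===== LEMMAS AND PROOFS =====

-- ===== VERDICT (by name: the statement is the Claim_ definition above) =====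
theorem are_intersecting_spec : Claim_equal_are_intersecting := by
  intro c1 c2 _
  obtain ⟨a1, b1, d1, a2, b2, d2⟩ := c1
  obtain ⟨e1, f1, g1, e2, f2, g2⟩ := c2
  unfold Spec_are_intersecting
  simp [are_intersecting, are_intersecting_alt, axis_ok, PySem.List.enumerate,
    point_in_cube, Bool.and_comm]
  generalize decide (a1 < e2) = A1
  generalize decide (e1 < a1) = A2
  generalize decide (a2 < e2) = A3
  generalize decide (e1 < a2) = A4
  generalize decide (b1 < f2) = B1
  generalize decide (f1 < b1) = B2
  generalize decide (b2 < f2) = B3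
  generalize decide (f1 < b2) = B4
  generalize decide (d1 < g2) = C1
  generalize decide (g1 < d1) = C2
  generalize decide (d2 < g2) = C3
  generalize decide (g1 < d2) = C4
  revert A1 A2 A3 A4 B1 B2 B3 B4 C1 C2 C3 C4
  decide
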